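-- pv_equiv track=rewrite | github.com/moosh/test_tube_game_solver | main.py | pourable_count
-- ===== SOURCE A (Python) =====
-- def pourable_count(in_array: []):
--     # Returns the number of items of the same color are at the top of the tube
--     out_count = 0
--     if len(in_array) == 0:
--         return 0
--     letter = in_array[-1]
--     out_count += 1
--
--     for i in range(2, len(in_array) + 1):  # use NEGATIVE of the range
--         if in_array[-i] == letter:
--             out_count += 1
--         else:
--             break
--
--     return out_count
-- ===== SOURCE B (Python) =====
-- def pourable_count(in_array: []):
--     # Single forward pass: track the length of the current run of equal items;
--     # the value after the loop is the length of the final run (0 for empty input).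
--     run = 0
--     prev = None
--     for x in in_array:
--         run = run + 1 if x == prev else 1
--         prev = x
--     return run
-- ===== Notes on version B (the rewrite author's own statement) =====
-- stated objective: alternative
-- what changed: Replaced the back-to-front indexed scan with an early break by a single forward pass that maintains the length of the current run (run/prev accumulator); the final run length is returned.
import Mathlib
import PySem

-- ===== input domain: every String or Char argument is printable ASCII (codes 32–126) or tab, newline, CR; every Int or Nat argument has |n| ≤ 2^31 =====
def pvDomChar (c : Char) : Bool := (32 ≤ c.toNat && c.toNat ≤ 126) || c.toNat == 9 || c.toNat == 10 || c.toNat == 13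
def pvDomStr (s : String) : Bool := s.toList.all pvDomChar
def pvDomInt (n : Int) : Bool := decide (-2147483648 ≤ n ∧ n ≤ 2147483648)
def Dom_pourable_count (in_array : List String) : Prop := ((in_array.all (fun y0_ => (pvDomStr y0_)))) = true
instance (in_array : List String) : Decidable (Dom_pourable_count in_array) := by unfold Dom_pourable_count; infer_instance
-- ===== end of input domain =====

-- B replaces A's back-to-front indexed scan with an early break by a single
-- forward pass maintaining a run/prev accumulator (alternative decomposition).

-- ===== PORT A =====
-- 'for i in range(2, len+1): if in_array[-i] == letter: out_count += 1 else: break'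
def pourAloop (xs : List String) (letter : String) : List Int → Int → Int
  | [], c => c
  | i :: rest, c =>
    match PySem.List.pyGet? xs (-i) with
    | some x => if x == letter then pourAloop xs letter rest (c + 1) else c
    | none => c  -- unreachable: every i drawn from range(2, len+1) is in range

def pourable_count (in_array : List String) : Int :=
  if in_array.length == 0 then 0
  else
    match PySem.List.pyGet? in_array (-1) with
    | some letter =>
        pourAloop in_array letter
          (PySem.List.pyRange 2 ((in_array.length : Int) + 1) 1) 1
    | none => 0  -- unreachable: the list is nonempty here

-- ===== PORT B =====
def pourable_count_alt (in_array : List String) : Int :=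
  (in_array.foldl
    (fun (st : Int × Option String) x =>
      if some x == st.2 then (st.1 + 1, some x) else (1, some x))
    (0, none)).1

-- ===== PRECONDITION & SPEC =====
def Spec_pourable_count (in_array : List String) (out : Int) : Prop := out = pourable_count_alt in_array
instance (in_array : List String) (out : Int) : Decidable (Spec_pourable_count in_array out) := by unfold Spec_pourable_count; infer_instance

-- ===== CLAIM (what is proved, stated in full; the proofs are below) =====
def Claim_equal_pourable_count : Prop := ∀ (in_array : List String), Dom_pourable_count in_array → Spec_pourable_count in_array (pourable_count in_array)

-- ===== LEMMAS AND PROOFS =====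

-- length of the run at the END of the original list, seen from the reversed list
def runRev : List String → Int
  | [] => 0
  | x :: r => 1 + ((r.takeWhile (fun y => y == x)).length : Int)

theorem runRev_cons (x : String) (r : List String) :
    runRev (x :: r) = if r.head? = some x then runRev r + 1 else 1 := by
  cases r with
  | nil => simp [runRev]
  | cons y r' =>
    by_cases h : y = x
    · subst h
      simp [runRev, List.takeWhile]
      omega
    · have hbe : (y == x) = false := by simp [h]
      simp [runRev, List.takeWhile, hbe, h]

theorem alt_state (rev : List String) :
    rev.reverse.foldl
      (fun (st : Int × Option String) x =>
        if some x == st.2 then (st.1 + 1, some x) else (1, some x))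
      (0, none)
    = (runRev rev, rev.head?) := by
  induction rev with
  | nil => simp [runRev]
  | cons x r ih =>
    have hrev : (x :: r).reverse = r.reverse ++ [x] := by simp
    rw [hrev, List.foldl_append, ih]
    simp only [List.foldl]
    rw [runRev_cons]
    by_cases h : r.head? = some x
    · rw [h]; simp
    · have hb : (some x == r.head?) = false := by
        cases hh : r.head? with
        | none => rfl
        | some z =>
          have hzx : x ≠ z := fun hz => h (by rw [hh, hz])
          simp [hzx]
      rw [hb, if_neg h]
      simp

theorem alt_eq_runRev (xs : List String) :
    pourable_count_alt xs = runRev xs.reverse := by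
  have h := alt_state xs.reverse
  rw [List.reverse_reverse] at h
  unfold pourable_count_alt
  rw [h]

theorem loopA_eq (xs : List String) (letter : String) :
    ∀ (rest2 pre : List String) (c : Int),
      1 ≤ pre.length → xs.reverse = pre ++ rest2 →
      pourAloop xs letter
        (PySem.List.pyRange ((pre.length : Int) + 1) ((xs.length : Int) + 1) 1) c
      = c + ((rest2.takeWhile (fun y => y == letter)).length : Int) := by
  intro rest2
  induction rest2 with
  | nil =>
    intro pre c h1 h2
    have hlen : pre.length = xs.length := by
      have := congrArg List.length h2; simp at this; omega
    rw [hlen, PySem.List.pyRange_one_eq_nil (by omega)]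
    simp [pourAloop]
  | cons y r2 ih =>
    intro pre c h1 h2
    have hlen : pre.length + 1 + r2.length = xs.length := by
      have := congrArg List.length h2; simp at this; omega
    have hcons : PySem.List.pyRange ((pre.length : Int) + 1) ((xs.length : Int) + 1) 1
        = ((pre.length : Int) + 1) :: PySem.List.pyRange ((pre.length : Int) + 1 + 1) ((xs.length : Int) + 1) 1 :=
      PySem.List.pyRange_one_cons (by omega)
    have hxs : xs = r2.reverse ++ y :: pre.reverse := by
      have : xs.reverse.reverse = (pre ++ y :: r2).reverse := by rw [h2]
      simpa using this
    have hget : PySem.List.pyGet? xs (-((pre.length : Int) + 1)) = some y := by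
      have hk : (-((pre.length : Int) + 1)) = -(((pre.length + 1 : Nat) : Int)) := by push_cast; ring
      rw [hk, PySem.List.pyGet?_neg_natCast xs (pre.length + 1) (by omega) (by omega)]
      have hidx : xs.length - (pre.length + 1) = r2.length := by omega
      rw [hidx, hxs]
      have : r2.length = r2.reverse.length := by simp
      rw [this, List.getElem?_append_right (by omega)]
      simp
    rw [hcons]
    simp only [pourAloop, hget]
    by_cases hy : y = letter
    · have hbe : (y == letter) = true := by simp [hy]
      rw [hbe, if_pos rfl]
      have hpre' : xs.reverse = (pre ++ [y]) ++ r2 := by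
        rw [h2]; simp
      have hih := ih (pre ++ [y]) (c + 1) (by simp) hpre'
      have harg : ((pre ++ [y]).length : Int) + 1 = (pre.length : Int) + 1 + 1 := by
        simp
      rw [harg] at hih
      rw [hih]
      simp [List.takeWhile, hbe]
      omega
    · have hbe : (y == letter) = false := by simp [hy]
      rw [hbe, if_neg (by simp)]
      simp [List.takeWhile, hbe]

theorem a_eq_runRev (xs : List String) :
    pourable_count xs = runRev xs.reverse := by
  cases hx : xs.reverse with
  | nil =>
    have : xs = [] := by simpa using congrArg List.reverse hx
    subst this; simp [pourable_count, runRev]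
  | cons letter rest =>
    have hne : xs ≠ [] := by
      intro h; subst h; simp at hx
    have hlast : PySem.List.pyGet? xs (-1) = some letter := by
      rw [PySem.List.pyGet?_neg_one]
      rw [List.getLast?_eq_head?_reverse, hx]
      rfl
    have hlen0 : (xs.length == 0) = false := by
      simp [List.length_eq_zero_iff, hne]
    have hloop := loopA_eq xs letter rest [letter] 1 (by simp) (by simp [hx])
    unfold pourable_count
    rw [hlen0]
    simp only [Bool.false_eq_true, if_false, hlast]
    norm_num at hloop
    rw [hloop]
    simp [runRev]

-- ===== VERDICT (by name: the statement is the Claim_ definition above) =====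
theorem pourable_count_spec : Claim_equal_pourable_count := by
  intro xs _
  unfold Spec_pourable_count
  rw [a_eq_runRev, alt_eq_runRev]
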